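-- pv_equiv track=rewrite | github.com/Limexcyan/mgreks | utils.py | build_hasse_edges
-- ===== SOURCE A (Python) =====
-- def is_refinement(partition1, partition2):
--     """
--     Returns True if partition1 <= partition2, where "<=" is a refinement order
--     :param partition1: first partition
--     :param partition2: second partition
--     :return:
--     """
--     elem_to_block = {}
--     for i, block in enumerate(partition2):
--         for x in block:
--             elem_to_block[x] = i
--     for block in partition1:
--         block_ids = {elem_to_block[x] for x in block}
--         if len(block_ids) > 1:
--             return False
--     return True
--
-- def all_partition_pairs(partition_list):
--     """
--     Returns all ordered pairs (p1, p2) from the list where p1 is a refinement of p2.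
--
--     :param partition_list: list of partitions (each a list of blocks)
--     :return: list of tuples (p1, p2) such that p1 <= p2 in refinement order
--     """
--     n = len(partition_list)
--     result = []
--
--     for i in range(n):
--         for j in range(n):
--             if i != j:
--                 p1, p2 = partition_list[i], partition_list[j]
--                 if is_refinement(p1, p2):
--                     result.append((p1, p2))
--
--     return result
--
-- def normalize(partition):
--     return tuple(sorted(tuple(sorted(block)) for block in partition))
--
-- def build_hasse_edges(partition_list):
--     nodes = [normalize(p) for p in partition_list]
--     edges = []
--     for a, b in all_partition_pairs(partition_list):
--         na, nb = normalize(a), normalize(b)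
--         if is_refinement(a, b):
--             is_cover = True
--             for c in partition_list:
--                 nc = normalize(c)
--                 if nc != na and nc != nb:
--                     if is_refinement(a, c) and is_refinement(c, b):
--                         is_cover = False
--                         break
--             if is_cover:
--                 edges.append((na, nb))
--     return nodes, edges
-- ===== SOURCE B (Python) =====
-- def _is_refinement(partition1, partition2):
--     elem_to_block = {x: i for i, block in enumerate(partition2) for x in block}
--     for block in partition1:
--         if len({elem_to_block[x] for x in block}) > 1:
--             return False
--     return True
--
-- def _normalize(partition):
--     return tuple(sorted(tuple(sorted(block)) for block in partition))
--
-- def build_hasse_edges(partition_list):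
--     n = len(partition_list)
--     norms = [_normalize(p) for p in partition_list]
--     # refinement matrix computed once: O(n^2 * m) instead of is_refinement inside an O(n^3) loop
--     ref = [[i != j and _is_refinement(partition_list[i], partition_list[j])
--             for j in range(n)] for i in range(n)]
--     edges = []
--     for i in range(n):
--         for j in range(n):
--             if ref[i][j]:
--                 cover = True
--                 for k in range(n):
--                     if norms[k] != norms[i] and norms[k] != norms[j] and ref[i][k] and ref[k][j]:
--                         cover = False
--                         break
--                 if cover:
--                     edges.append((norms[i], norms[j]))
--     return norms, edges
-- ===== Notes on version B (the rewrite author's own statement) =====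
-- stated objective: faster
-- what changed: B computes the normalized partitions and the full pairwise refinement matrix once up front, then decides every cover edge by table lookups, instead of re-running normalize and is_refinement inside A's triple nested loop.
import Mathlib
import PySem

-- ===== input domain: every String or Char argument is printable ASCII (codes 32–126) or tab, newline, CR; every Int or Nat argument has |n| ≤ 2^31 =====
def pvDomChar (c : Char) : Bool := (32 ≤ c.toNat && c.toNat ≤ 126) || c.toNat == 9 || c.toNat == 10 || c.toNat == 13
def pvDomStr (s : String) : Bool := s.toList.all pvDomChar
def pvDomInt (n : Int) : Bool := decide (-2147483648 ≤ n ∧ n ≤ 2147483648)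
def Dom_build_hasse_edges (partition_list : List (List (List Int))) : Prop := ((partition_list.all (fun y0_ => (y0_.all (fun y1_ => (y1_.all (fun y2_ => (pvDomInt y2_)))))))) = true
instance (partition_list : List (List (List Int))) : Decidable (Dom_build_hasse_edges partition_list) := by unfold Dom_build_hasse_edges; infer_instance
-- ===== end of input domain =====

-- B replaces the repeated normalize/is_refinement calls inside A's triple loop by a
-- normalized-forms list and a refinement matrix computed once (objective: faster).

-- ===== PORT A =====

-- is_refinement: elem_to_block dict, then every block of p1 must map into one block id.
-- elem_to_block[x] is ported with default 0; exact whenever every element of p1 occurs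
-- in p2 (guaranteed by Pre_build_hasse_edges; outside it Python raises KeyError).
def pvIsRefinement (p1 p2 : List (List Int)) : Bool :=
  let elem_to_block : PySem.Dict Int Int :=
    (PySem.List.enumerate p2).foldl
      (fun d ib => ib.2.foldl (fun d x => d.insert x ib.1) d) PySem.Dict.empty
  -- 'for block: if len(...) > 1: return False / return True' is p1.all of the negated test
  p1.all (fun block =>
    let block_ids : PySem.Set Int :=
      PySem.Set.ofList (block.map (fun x => elem_to_block.getD x 0))
    !(decide (block_ids.length > 1)))

def pvNormalize (p : List (List Int)) : List (List Int) :=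
  PySem.List.sorted (p.map (fun block => PySem.List.sorted block (fun x => x) false)) (fun x => x) false

def pvAllPartitionPairs (pl : List (List (List Int))) : List (List (List Int) × List (List Int)) :=
  let n : Int := PySem.List.len pl
  (PySem.List.pyRange 0 n 1).foldl (fun result i =>
    (PySem.List.pyRange 0 n 1).foldl (fun result j =>
      if i ≠ j then
        -- indices from range(n) are always in range, so the [] default is never used
        let p1 := PySem.List.pyGetD pl i []
        let p2 := PySem.List.pyGetD pl j []
        if pvIsRefinement p1 p2 then result ++ [(p1, p2)] else result
      else result) result) []

def build_hasse_edges (partition_list : List (List (List Int))) : List (List (List Int)) × (List (List (List Int) × List (List Int))) :=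
  let nodes := partition_list.map pvNormalize
  let edges := (pvAllPartitionPairs partition_list).foldl (fun edges ab =>
    let na := pvNormalize ab.1
    let nb := pvNormalize ab.2
    if pvIsRefinement ab.1 ab.2 then
      -- the 'is_cover = True … break' flag loop is the negation of an any-scan
      let is_cover := !(partition_list.any (fun c =>
        let nc := pvNormalize c
        decide (nc ≠ na) && decide (nc ≠ nb) && pvIsRefinement ab.1 c && pvIsRefinement c ab.2))
      if is_cover then edges ++ [(na, nb)] else edges
    else edges) []
  (nodes, edges)

-- ===== PORT B =====

-- same refinement predicate, written with a dict comprehension in Source B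
def pvIsRefinementB (p1 p2 : List (List Int)) : Bool :=
  let m : PySem.Dict Int Int :=
    (PySem.List.enumerate p2).foldl
      (fun d ib => ib.2.foldl (fun d x => d.insert x ib.1) d) PySem.Dict.empty
  p1.all (fun block =>
    !(decide ((PySem.Set.ofList (block.map (fun x => m.getD x 0))).length > 1)))

def pvNormalizeB (p : List (List Int)) : List (List Int) :=
  PySem.List.sorted (p.map (fun block => PySem.List.sorted block (fun x => x) false)) (fun x => x) false

def build_hasse_edges_alt (partition_list : List (List (List Int))) : List (List (List Int)) × (List (List (List Int) × List (List Int))) :=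
  let n := partition_list.length
  let norms := partition_list.map pvNormalizeB
  -- range(n) over the length of a list is ported as List.range n (exact: n ≥ 0);
  -- list indexing at i < n is ported with getD (the default is never used)
  let ref : List (List Bool) := (List.range n).map (fun i => (List.range n).map (fun j =>
    decide (i ≠ j) && pvIsRefinementB (partition_list.getD i []) (partition_list.getD j [])))
  let edges := (List.range n).foldl (fun es i =>
    (List.range n).foldl (fun es j =>
      if (ref.getD i []).getD j false then
        -- the 'cover = True … break' flag loop is the negation of an any-scan
        let cover := !((List.range n).any (fun k =>
          decide (norms.getD k [] ≠ norms.getD i []) && decide (norms.getD k [] ≠ norms.getD j []) &&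
          (ref.getD i []).getD k false && (ref.getD k []).getD j false))
        if cover then es ++ [(norms.getD i [], norms.getD j [])] else es
      else es) es) []
  (norms, edges)

-- ===== PRECONDITION & SPEC =====
-- Pre_ excludes inputs where some partition contains an element missing from another
-- partition: there Python A's is_refinement can raise KeyError (on a few such inputs A
-- happens to return early with False and both programs still agree). Both ports are
-- total (the dict lookup carries a default), so the equivalence proof below does not
-- need Pre_; Pre_ only marks where the two PYTHON programs raise instead of returning.
def Pre_build_hasse_edges (partition_list : List (List (List Int))) : Prop :=
  ∀ p ∈ partition_list, ∀ q ∈ partition_list, ∀ b ∈ p, ∀ x ∈ b, ∃ c ∈ q, x ∈ c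
instance (partition_list : List (List (List Int))) : Decidable (Pre_build_hasse_edges partition_list) := by unfold Pre_build_hasse_edges; infer_instance

def pvWitness_build_hasse_edges : List (List (List Int)) := [[[0], [1]], [[0, 1]]]

def Spec_build_hasse_edges (partition_list : List (List (List Int))) (out : List (List (List Int)) × (List (List (List Int) × List (List Int)))) : Prop := out = build_hasse_edges_alt partition_list
instance (partition_list : List (List (List Int))) (out : List (List (List Int)) × (List (List (List Int) × List (List Int)))) : Decidable (Spec_build_hasse_edges partition_list out) := by unfold Spec_build_hasse_edges; infer_instance

-- ===== CLAIM (what is proved, stated in full; the proofs are below) =====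
def Claim_equal_build_hasse_edges : Prop := ∀ (partition_list : List (List (List Int))), Dom_build_hasse_edges partition_list → Pre_build_hasse_edges partition_list → Spec_build_hasse_edges partition_list (build_hasse_edges partition_list)

-- ===== LEMMAS AND PROOFS =====

-- canonical form both edge computations are reduced to
def pvN (pl : List (List (List Int))) (i : Nat) : List (List Int) :=
  (pl.map pvNormalize).getD i []
def pvR (pl : List (List (List Int))) (i j : Nat) : Bool :=
  decide (i ≠ j) && pvIsRefinement (pl.getD i []) (pl.getD j [])
def pvCov (pl : List (List (List Int))) (i j : Nat) : Bool :=
  (List.range pl.length).any (fun k =>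
    decide (pvN pl k ≠ pvN pl i) && decide (pvN pl k ≠ pvN pl j) && pvR pl i k && pvR pl k j)
def pvEdges (pl : List (List (List Int))) : List (List (List Int) × List (List Int)) :=
  (List.range pl.length).flatMap (fun i => (List.range pl.length).flatMap (fun j =>
    if pvR pl i j && !pvCov pl i j then [(pvN pl i, pvN pl j)] else []))

theorem pv_flatMap_congr_mem {α β : Type} {l : List α} {f g : α → List β}
    (h : ∀ x ∈ l, f x = g x) : l.flatMap f = l.flatMap g := by
  simp only [List.flatMap]
  rw [List.map_congr_left h]

theorem pv_getD_map {α β : Type} (f : α → β) (l : List α) (i : Nat) (d1 : α) (d2 : β)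
    (hi : i < l.length) : (l.map f).getD i d2 = f (l.getD i d1) := by
  simp [List.getD_eq_getElem?_getD, hi]

theorem pv_ref_lookup (pl : List (List (List Int))) (i j : Nat)
    (hi : i < pl.length) (hj : j < pl.length) :
    ((((List.range pl.length).map (fun i => (List.range pl.length).map (fun j =>
      decide (i ≠ j) && pvIsRefinement (pl.getD i []) (pl.getD j [])))).getD i []).getD j false)
    = pvR pl i j := by
  rw [PySem.List.getD_map_range _ _ _ _ hi, PySem.List.getD_map_range _ _ _ _ hj, pvR]

theorem pv_any_eq_range {α : Type} (l : List α) (f : α → Bool) (d : α) :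
    l.any f = (List.range l.length).any (fun k => f (l.getD k d)) := by
  rw [Bool.eq_iff_iff]
  simp only [List.any_eq_true, List.mem_range]
  constructor
  · rintro ⟨x, hx, hfx⟩
    obtain ⟨k, hk, rfl⟩ := List.mem_iff_getElem.mp hx
    exact ⟨k, hk, by simpa [List.getD_eq_getElem?_getD, List.getElem?_eq_getElem, hk] using hfx⟩
  · rintro ⟨k, hk, hfk⟩
    refine ⟨l.getD k d, ?_, hfk⟩
    simp [List.getD_eq_getElem?_getD, hk, List.mem_iff_getElem]
    exact ⟨k, hk, rfl⟩

theorem pv_cov_body (pl : List (List (List Int))) (i j k : Nat)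
    (hi : i < pl.length) (hj : j < pl.length) (hk : k < pl.length) :
    (decide (pvNormalize (pl.getD k []) ≠ pvNormalize (pl.getD i [])) &&
     decide (pvNormalize (pl.getD k []) ≠ pvNormalize (pl.getD j [])) &&
     pvIsRefinement (pl.getD i []) (pl.getD k []) &&
     pvIsRefinement (pl.getD k []) (pl.getD j []))
    = (decide (pvN pl k ≠ pvN pl i) && decide (pvN pl k ≠ pvN pl j) && pvR pl i k && pvR pl k j) := by
  rw [pvN, pvN, pvN, pv_getD_map pvNormalize pl i [] [] hi, pv_getD_map pvNormalize pl j [] [] hj,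
    pv_getD_map pvNormalize pl k [] [] hk]
  by_cases hik : i = k
  · subst hik; simp [pvR]
  · by_cases hkj : k = j
    · subst hkj; simp [pvR]
    · simp [pvR, hik, hkj]

theorem pv_B_eq (pl : List (List (List Int))) :
    build_hasse_edges_alt pl = (pl.map pvNormalize, pvEdges pl) := by
  have hBA : pvIsRefinementB = pvIsRefinement := rfl
  have hNB : pvNormalizeB = pvNormalize := rfl
  simp only [build_hasse_edges_alt, hBA, hNB, Prod.mk.injEq]
  refine ⟨trivial, ?_⟩
  rw [PySem.List.foldl_congr_mem _ _
    (fun es i => es ++ (List.range pl.length).flatMap (fun j =>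
      if pvR pl i j && !pvCov pl i j then [(pvN pl i, pvN pl j)] else [])) _ ?_]
  · rw [PySem.List.foldl_append_eq_flatMap, List.nil_append, pvEdges]
  · intro es i hmi
    have hi := List.mem_range.mp hmi
    rw [PySem.List.foldl_congr_mem _ _
      (fun es j => es ++ (if pvR pl i j && !pvCov pl i j then [(pvN pl i, pvN pl j)] else [])) _ ?_]
    · rw [PySem.List.foldl_append_eq_flatMap]
    · intro acc j hmj
      have hj := List.mem_range.mp hmj
      rw [pv_ref_lookup pl i j hi hj]
      have hany : ((List.range pl.length).any (fun k =>
          decide ((pl.map pvNormalize).getD k [] ≠ (pl.map pvNormalize).getD i []) &&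
          decide ((pl.map pvNormalize).getD k [] ≠ (pl.map pvNormalize).getD j []) &&
          ((((List.range pl.length).map (fun i => (List.range pl.length).map (fun j =>
            decide (i ≠ j) && pvIsRefinement (pl.getD i []) (pl.getD j [])))).getD i []).getD k false) &&
          ((((List.range pl.length).map (fun i => (List.range pl.length).map (fun j =>
            decide (i ≠ j) && pvIsRefinement (pl.getD i []) (pl.getD j [])))).getD k []).getD j false)))
          = pvCov pl i j := by
        rw [pvCov]
        apply PySem.List.any_congr_mem
        intro k hmk
        have hk := List.mem_range.mp hmk
        rw [pv_ref_lookup pl i k hi hk, pv_ref_lookup pl k j hk hj, pvN, pvN, pvN]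
      rw [hany]
      cases hR : pvR pl i j <;> cases hC : pvCov pl i j <;> simp [hR, hC, pvN]

theorem pv_pairs_eq (pl : List (List (List Int))) :
    pvAllPartitionPairs pl = (List.range pl.length).flatMap (fun i =>
      (List.range pl.length).flatMap (fun j =>
        if pvR pl i j then [(pl.getD i [], pl.getD j [])] else [])) := by
  have hrange : PySem.List.pyRange 0 (PySem.List.len pl) 1
      = (List.range pl.length).map (fun k : Nat => (k : Int)) := by
    have h1 : ((PySem.List.len pl) - 0).toNat = pl.length := by simp
    rw [PySem.List.pyRange_one, h1]
    exact List.map_congr_left (fun k _ => by simp)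
  simp only [pvAllPartitionPairs, hrange, List.foldl_map]
  rw [PySem.List.foldl_congr_mem _ _
    (fun res i => res ++ (List.range pl.length).flatMap (fun j =>
      if pvR pl i j then [(pl.getD i [], pl.getD j [])] else [])) _ ?_]
  · rw [PySem.List.foldl_append_eq_flatMap, List.nil_append]
  · intro res i _
    rw [PySem.List.foldl_congr_mem _ _
      (fun res j => res ++ (if pvR pl i j then [(pl.getD i [], pl.getD j [])] else [])) _ ?_]
    · rw [PySem.List.foldl_append_eq_flatMap]
    · intro acc j _
      simp only [PySem.List.pyGetD_natCast]
      by_cases hij : i = j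
      · simp [pvR, hij]
      · cases hR : pvIsRefinement (pl.getD i []) (pl.getD j []) <;>
          · simp only [List.getD_eq_getElem?_getD] at hR
            simp [pvR, hij, hR, Ne]

theorem pv_A_eq (pl : List (List (List Int))) :
    build_hasse_edges pl = (pl.map pvNormalize, pvEdges pl) := by
  simp only [build_hasse_edges, Prod.mk.injEq]
  refine ⟨trivial, ?_⟩
  rw [PySem.List.foldl_congr_mem _ _
    (fun edges ab => edges ++ (if pvIsRefinement ab.1 ab.2 then
      (if !(pl.any (fun c =>
        decide (pvNormalize c ≠ pvNormalize ab.1) && decide (pvNormalize c ≠ pvNormalize ab.2) &&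
        pvIsRefinement ab.1 c && pvIsRefinement c ab.2))
       then [(pvNormalize ab.1, pvNormalize ab.2)] else []) else [])) _ ?_]
  · rw [PySem.List.foldl_append_eq_flatMap, List.nil_append, pv_pairs_eq,
      List.flatMap_assoc, pvEdges]
    apply pv_flatMap_congr_mem
    intro i hmi
    have hi := List.mem_range.mp hmi
    rw [List.flatMap_assoc]
    apply pv_flatMap_congr_mem
    intro j hmj
    have hj := List.mem_range.mp hmj
    cases hR : pvR pl i j
    · simp
    · simp only [ite_true, List.flatMap_cons, List.flatMap_nil, List.append_nil]
      have hRef : pvIsRefinement (pl.getD i []) (pl.getD j []) = true := by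
        have := hR; rw [pvR, Bool.and_eq_true] at this; exact this.2
      have hany : (pl.any (fun c =>
          decide (pvNormalize c ≠ pvNormalize (pl.getD i [])) &&
          decide (pvNormalize c ≠ pvNormalize (pl.getD j [])) &&
          pvIsRefinement (pl.getD i []) c && pvIsRefinement c (pl.getD j [])))
          = pvCov pl i j := by
        rw [pv_any_eq_range pl _ []]
        rw [pvCov]
        apply PySem.List.any_congr_mem
        intro k hmk
        exact pv_cov_body pl i j k hi hj (List.mem_range.mp hmk)
      have hNi : pvN pl i = pvNormalize (pl.getD i []) := pv_getD_map pvNormalize pl i [] [] hi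
      have hNj : pvN pl j = pvNormalize (pl.getD j []) := pv_getD_map pvNormalize pl j [] [] hj
      rw [hRef, hany, ← hNi, ← hNj]
      cases hC : pvCov pl i j <;>
        simp only [Bool.not_true, Bool.not_false, Bool.and_true, Bool.and_false,
          if_true, ite_false]
  · intro edges ab _
    cases hR : pvIsRefinement ab.1 ab.2 <;> split_ifs <;> simp_all

-- ===== VERDICT (by name: the statement is the Claim_ definition above) =====
theorem build_hasse_edges_spec : Claim_equal_build_hasse_edges := by
  intro pl _ _
  unfold Spec_build_hasse_edges
  rw [pv_A_eq, pv_B_eq]
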